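-- pv_equiv track=rewrite | github.com/kitech/qt.gen | gengo.py | dedup_return_const_diff_method
-- ===== SOURCE A (Python) =====
-- def dedup_return_const_diff_method(methods):
--     dupremove = []
--     for mtop in methods:
--         postop = mtop.find('Q')
--         for msub in methods:
--             if mtop == msub: continue
--             possub = msub.find('Q')
--             if mtop[postop:] != msub[possub:]: continue
--             if postop > possub: dupremove.append(mtop)
--             else: dupremove.append(msub)
--     return dupremove
-- ===== SOURCE B (Python) =====
-- def dedup_return_const_diff_method(methods):
--     # Group methods by their suffix-from-'Q' key once, then scan only each method's group.
--     keyed = [(m, m.find('Q')) for m in methods]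
--     groups = {}
--     for m, p in keyed:
--         groups.setdefault(m[p:], []).append((m, p))
--     out = []
--     for m, p in keyed:
--         for m2, p2 in groups[m[p:]]:
--             if m2 != m:
--                 out.append(m if p > p2 else m2)
--     return out
-- ===== Notes on version B (the rewrite author's own statement) =====
-- stated objective: faster
-- what changed: B builds a dict grouping each method by its suffix-from-'Q' key in one pass and compares each method only against its own group, instead of A's all-pairs nested scan.
import Mathlib
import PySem

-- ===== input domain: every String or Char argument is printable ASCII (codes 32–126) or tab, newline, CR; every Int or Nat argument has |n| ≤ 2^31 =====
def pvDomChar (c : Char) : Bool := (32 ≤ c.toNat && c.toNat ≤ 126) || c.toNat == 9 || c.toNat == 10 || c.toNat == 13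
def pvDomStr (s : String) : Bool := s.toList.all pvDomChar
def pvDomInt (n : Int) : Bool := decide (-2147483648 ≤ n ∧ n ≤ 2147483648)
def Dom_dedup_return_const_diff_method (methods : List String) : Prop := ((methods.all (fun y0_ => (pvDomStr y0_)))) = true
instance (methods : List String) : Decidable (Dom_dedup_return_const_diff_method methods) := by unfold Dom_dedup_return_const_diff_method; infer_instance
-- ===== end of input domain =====

-- B groups methods by their suffix-from-'Q' key in a dict built once, scanning only each method's group (A scans all pairs); objective: faster.


-- ===== PORT A =====
def dedup_return_const_diff_method (methods : List String) : List String :=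
  methods.foldl (fun dupremove mtop =>
    let postop := PySem.Str.find mtop "Q"
    methods.foldl (fun acc msub =>
      if mtop = msub then acc
      else
        let possub := PySem.Str.find msub "Q"
        if PySem.Str.slice mtop (some postop) none ≠ PySem.Str.slice msub (some possub) none then acc
        else if postop > possub then acc ++ [mtop] else acc ++ [msub]) dupremove) []

-- ===== PORT B =====
-- the suffix key m[p:] (p = m.find('Q'), possibly -1)
def pvKeyB (mp : String × Int) : String := PySem.Str.slice mp.1 (some mp.2) none

def dedup_return_const_diff_method_alt (methods : List String) : List String :=
  let keyed := methods.map (fun m => (m, PySem.Str.find m "Q"))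
  let groups := keyed.foldl
    (fun d mp => d.modify (pvKeyB mp) [] (· ++ [mp])) PySem.Dict.empty
  keyed.foldl (fun out mp =>
    (groups.getD (pvKeyB mp) []).foldl (fun out2 mq =>
      if mq.1 ≠ mp.1 then out2 ++ [if mp.2 > mq.2 then mp.1 else mq.1] else out2) out) []

-- ===== PRECONDITION & SPEC =====
def Spec_dedup_return_const_diff_method (methods : List String) (out : List String) : Prop := out = dedup_return_const_diff_method_alt methods
instance (methods : List String) (out : List String) : Decidable (Spec_dedup_return_const_diff_method methods out) := by unfold Spec_dedup_return_const_diff_method; infer_instance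

-- ===== CLAIM (what is proved, stated in full; the proofs are below) =====
def Claim_equal_dedup_return_const_diff_method : Prop := ∀ (methods : List String), Dom_dedup_return_const_diff_method methods → Spec_dedup_return_const_diff_method methods (dedup_return_const_diff_method methods)

-- ===== LEMMAS AND PROOFS =====

-- the grouping dict looks up to the key-filtered sublist of `keyed`
lemma groups_getD (keyed : List (String × Int)) (k : String) :
    (keyed.foldl (fun d mp => d.modify (pvKeyB mp) [] (· ++ [mp])) PySem.Dict.empty).getD k []
      = keyed.filter (fun mq => pvKeyB mq == k) := by
  have h1 : (keyed.foldl (fun d mp => d.modify (pvKeyB mp) [] (· ++ [mp])) PySem.Dict.empty)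
      = ((keyed.map (fun mp => (pvKeyB mp, mp))).foldl
          (fun d p => d.modify p.1 [] (· ++ [p.2])) PySem.Dict.empty) := by
    rw [List.foldl_map]
  rw [h1, PySem.Dict.getD_foldl_modify_append]
  simp only [List.filter_map, Function.comp_def, List.map_map]
  simp

-- the same, with the build loop folded directly over the method names
lemma groups_getD' (methods : List String) (k : String) :
    (methods.foldl (fun d m =>
        d.modify (pvKeyB (m, PySem.Str.find m "Q")) [] (· ++ [(m, PySem.Str.find m "Q")]))
      PySem.Dict.empty).getD k []
      = (methods.map (fun m => (m, PySem.Str.find m "Q"))).filter (fun mq => pvKeyB mq == k) := by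
  rw [← groups_getD (methods.map (fun m => (m, PySem.Str.find m "Q"))) k, List.foldl_map]

-- the two inner loops append the same elements for a fixed mtop
lemma inner_eq (methods : List String) (mtop : String) (acc : List String) :
    (methods.foldl (fun acc msub =>
      if mtop = msub then acc
      else
        if PySem.Str.slice mtop (some (PySem.Str.find mtop "Q")) none
            ≠ PySem.Str.slice msub (some (PySem.Str.find msub "Q")) none then acc
        else if PySem.Str.find mtop "Q" > PySem.Str.find msub "Q" then acc ++ [mtop] else acc ++ [msub]) acc)
      = (((methods.map (fun m => (m, PySem.Str.find m "Q"))).filter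
            (fun mq => pvKeyB mq == pvKeyB (mtop, PySem.Str.find mtop "Q"))).foldl
          (fun out2 mq =>
            if mq.1 ≠ mtop then out2 ++ [if PySem.Str.find mtop "Q" > mq.2 then mtop else mq.1] else out2) acc) := by
  rw [List.foldl_filter, List.foldl_map]
  induction methods generalizing acc with
  | nil => rfl
  | cons m ms ih =>
    simp only [List.foldl_cons]
    rw [ih]
    congr 1
    simp only [pvKeyB, beq_iff_eq]
    by_cases he : mtop = m
    · subst he; simp
    · by_cases hk : PySem.Str.slice m (some (PySem.Str.find m "Q")) none
          = PySem.Str.slice mtop (some (PySem.Str.find mtop "Q")) none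
      · rw [if_neg he, if_neg (not_not_intro hk.symm), if_pos hk,
            if_pos (fun h => he h.symm)]
        split <;> rfl
      · rw [if_neg he, if_pos (fun h => hk h.symm), if_neg hk]

-- ===== VERDICT (by name: the statement is the Claim_ definition above) =====
theorem dedup_return_const_diff_method_spec : Claim_equal_dedup_return_const_diff_method := by
  intro methods _
  unfold Spec_dedup_return_const_diff_method dedup_return_const_diff_method dedup_return_const_diff_method_alt
  simp only [List.foldl_map, groups_getD']
  apply Eq.symm
  apply List.foldl_ext
  intro acc m _
  exact (inner_eq methods m acc).symm
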